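-- pv_equiv track=rewrite | github.com/5z1punch/Lodgehog | utils/debug.py | dump_lines
-- ===== SOURCE A (Python) =====
-- def dump_lines(contents, start, num):
--     i = 1
--     pos = 0
--     _str = ""
--     while i <= start + num:
--         xpos = contents.find("\n", pos) + 1
--         if xpos == 0:
--             break
--         if start <= i:
--             _str += contents[pos:xpos]
--         pos = xpos
--         i += 1
--     return _str
-- ===== SOURCE B (Python) =====
-- def dump_lines(contents, start, num):
--     res = ""
--     buf = ""
--     i = 1
--     for ch in contents:
--         buf += ch
--         if ch == "\n":
--             if start <= i <= start + num:
--                 res += buf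
--             buf = ""
--             i += 1
--     return res
-- ===== Notes on version B (the rewrite author's own statement) =====
-- stated objective: alternative
-- what changed: A repeatedly calls str.find to jump from newline to newline and slices each wanted line out of the text with an early break; B makes a single character-by-character pass with a line buffer and a line counter, emitting each completed line whose index lies in [start, start+num].
import Mathlib
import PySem

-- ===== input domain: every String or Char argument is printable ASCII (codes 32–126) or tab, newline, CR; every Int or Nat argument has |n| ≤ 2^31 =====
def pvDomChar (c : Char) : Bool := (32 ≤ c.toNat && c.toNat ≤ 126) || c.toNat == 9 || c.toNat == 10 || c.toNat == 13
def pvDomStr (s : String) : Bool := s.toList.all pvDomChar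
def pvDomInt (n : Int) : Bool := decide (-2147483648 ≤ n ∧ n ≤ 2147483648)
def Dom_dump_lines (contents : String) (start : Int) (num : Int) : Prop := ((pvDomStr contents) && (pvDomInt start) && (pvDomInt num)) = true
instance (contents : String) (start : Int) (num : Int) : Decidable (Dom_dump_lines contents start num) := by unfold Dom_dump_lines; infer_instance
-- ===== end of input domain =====

-- B replaces A's find-and-slice while-loop by a single left-to-right fold over the
-- characters with a line buffer and a line counter (objective: alternative, not faster).

-- ===== PORT A =====
-- A's while loop: state (pos, i, _str); strings handled as char lists (exact).
def dumpAGo (c : List Char) (start num : Int) (pos i : Int) (acc : List Char) : List Char :=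
  if _h : i ≤ start + num then
    let xpos := PySem.Chars.findFrom c ['\n'] pos none + 1
    if xpos = 0 then acc
    else
      let acc' := if start ≤ i then acc ++ PySem.Chars.slice c (some pos) (some xpos) else acc
      dumpAGo c start num xpos (i + 1) acc'
  else acc
termination_by (start + num + 1 - i).toNat
decreasing_by omega

def dump_lines (contents : String) (start : Int) (num : Int) : String :=
  String.ofList (dumpAGo contents.toList start num 0 1 [])

-- ===== PORT B =====
-- the body of Source B's for-loop: state (res, buf, i)
def altStep (start num : Int) (s : List Char × List Char × Int) (ch : Char) : List Char × List Char × Int :=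
  let buf := s.2.1 ++ [ch]
  if ch = '\n' then
    (if start ≤ s.2.2 ∧ s.2.2 ≤ start + num then s.1 ++ buf else s.1, ([] : List Char), s.2.2 + 1)
  else (s.1, buf, s.2.2)

def dump_lines_alt (contents : String) (start : Int) (num : Int) : String :=
  String.ofList (contents.toList.foldl (altStep start num) (([] : List Char), ([] : List Char), (1 : Int))).1

-- ===== PRECONDITION & SPEC =====
def Spec_dump_lines (contents : String) (start : Int) (num : Int) (out : String) : Prop := out = dump_lines_alt contents start num
instance (contents : String) (start : Int) (num : Int) (out : String) : Decidable (Spec_dump_lines contents start num out) := by unfold Spec_dump_lines; infer_instance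

-- ===== CLAIM (what is proved, stated in full; the proofs are below) =====
def Claim_equal_dump_lines : Prop := ∀ (contents : String) (start : Int) (num : Int), Dom_dump_lines contents start num → Spec_dump_lines contents start num (dump_lines contents start num)

-- ===== LEMMAS AND PROOFS =====

-- common specification: the newline-terminated lines of a char list
def linesOf : List Char → List (List Char)
  | [] => []
  | ch :: rest =>
    if ch = '\n' then [ch] :: linesOf rest
    else match linesOf rest with
      | [] => []
      | l :: ls => (ch :: l) :: ls

-- emit the lines whose 1-based index i satisfies start ≤ i ≤ start + num
def gSpec (start num : Int) : List (List Char) → Int → List Char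
  | [], _ => []
  | l :: ls, i =>
    if i ≤ start + num then (if start ≤ i then l else []) ++ gSpec start num ls (i + 1) else []

theorem gSpec_of_gt (start num : Int) (ls : List (List Char)) (i : Int)
    (h : start + num < i) : gSpec start num ls i = [] := by
  cases ls with
  | nil => rfl
  | cons l ls => simp [gSpec]; omega

theorem linesOf_nil_of_not_mem (u : List Char) (h : '\n' ∉ u) : linesOf u = [] := by
  induction u with
  | nil => rfl
  | cons c rest ih =>
    simp at h
    simp [linesOf, Ne.symm h.1, ih h.2]

theorem linesOf_append_newline (u v : List Char) (h : '\n' ∉ u) :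
    linesOf (u ++ '\n' :: v) = (u ++ ['\n']) :: linesOf v := by
  induction u with
  | nil => simp [linesOf]
  | cons c rest ih =>
    simp at h
    simp [linesOf, Ne.symm h.1, ih h.2]

theorem singleton_infix_iff (a : Char) (l : List Char) : [a] <:+: l ↔ a ∈ l := by
  constructor
  · rintro ⟨s, t, rfl⟩; simp
  · intro h
    obtain ⟨s, t, rfl⟩ := List.append_of_mem h
    exact ⟨s, t, by simp⟩

theorem mainB (start num : Int) (c : List Char) :
    ∀ (buf res : List Char) (i : Int), '\n' ∉ buf →
      (c.foldl (altStep start num) (res, buf, i)).1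
        = res ++ gSpec start num (linesOf (buf ++ c)) i := by
  induction c with
  | nil =>
    intro buf res i h
    simp [linesOf_nil_of_not_mem buf h, gSpec]
  | cons ch rest ih =>
    intro buf res i h
    by_cases hch : ch = '\n'
    · subst hch
      rw [show buf ++ '\n' :: rest = buf ++ '\n' :: ([] ++ rest) by simp,
        linesOf_append_newline buf _ h]
      simp only [List.foldl_cons, altStep, if_true]
      rw [ih [] _ (i + 1) (by simp)]
      simp only [List.nil_append, gSpec]
      by_cases h1 : i ≤ start + num
      · by_cases h2 : start ≤ i
        · simp [h1, h2]
        · simp [h1, h2]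
      · have : start + num < i + 1 := by omega
        simp [h1, gSpec_of_gt start num _ _ this]
    · simp only [List.foldl_cons, altStep, if_neg hch]
      rw [ih (buf ++ [ch]) res i (by simp [h, Ne.symm hch])]
      simp

theorem mainA (start num : Int) (c : List Char) :
    ∀ (k : Nat), k ≤ c.length → ∀ (i : Int) (acc : List Char),
      dumpAGo c start num (k : Int) i acc = acc ++ gSpec start num (linesOf (c.drop k)) i := by
  have H : ∀ (n k : Nat), c.length - k = n → k ≤ c.length → ∀ (i : Int) (acc : List Char),
      dumpAGo c start num (k : Int) i acc = acc ++ gSpec start num (linesOf (c.drop k)) i := by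
    intro n
    induction n using Nat.strong_induction_on with
    | _ n IH =>
      intro k hn hk i acc
      rw [dumpAGo]
      by_cases hi : i ≤ start + num
      · simp only [dif_pos hi]
        rw [PySem.Chars.findFrom_natCast c ['\n'] k hk]
        by_cases hf : PySem.Chars.find (c.drop k) ['\n'] = -1
        · have hmem : '\n' ∉ c.drop k := by
            have := (PySem.Chars.find_eq_neg_one_iff (c.drop k) ['\n']).mp hf
            rw [singleton_infix_iff] at this
            exact this
          simp [hf, linesOf_nil_of_not_mem _ hmem, gSpec]
        · have hnn : 0 ≤ PySem.Chars.find (c.drop k) ['\n'] := by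
            have := PySem.Chars.neg_one_le_find (c.drop k) ['\n']
            omega
          obtain ⟨hpre, hmin⟩ := PySem.Chars.find_spec hnn
          generalize hj : (PySem.Chars.find (c.drop k) ['\n']).toNat = j at hpre hmin
          have hfind : PySem.Chars.find (c.drop k) ['\n'] = (j : Int) := by omega
          obtain ⟨v, hv⟩ := hpre
          have hlen : (c.drop k).length = c.length - k := by simp
          have hjlt : j < (c.drop k).length := by
            have := congrArg List.length hv
            simp at this
            rw [hlen]; omega
          have hul : ((c.drop k).take j).length = j := by
            rw [List.length_take]; omega
          have hsplit : c.drop k = (c.drop k).take j ++ '\n' :: v := by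
            conv_lhs => rw [← List.take_append_drop j (c.drop k)]
            rw [← hv]; simp
          have hnotu : '\n' ∉ (c.drop k).take j := by
            intro hmemu
            obtain ⟨m, hm, hget⟩ := List.getElem_of_mem hmemu
            have hmlt : m < j := by omega
            apply hmin m hmlt
            have hdropm : (c.drop k).drop m = '\n' :: (c.drop k).drop (m + 1) := by
              rw [List.drop_eq_getElem_cons (by omega)]
              congr 1
              rw [show (c.drop k)[m]'(by omega) = ((c.drop k).take j)[m]'(by omega) by
                simp [List.getElem_take]]
              exact hget
            rw [hdropm]
            exact ⟨_, rfl⟩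
          simp only [hfind]
          rw [if_neg (show ¬((j : Int) = -1) by omega)]
          rw [if_neg (show ¬((k : Int) + (j : Int) + 1 = 0) by omega)]
          -- slice c [k : k + j + 1] = take j (drop k c) ++ ['\n']
          have hslice : PySem.Chars.slice c (some (k : Int)) (some ((k : Int) + (j : Int) + 1))
              = (c.drop k).take j ++ ['\n'] := by
            rw [show (k : Int) + (j : Int) + 1 = ((k : Nat) : Int) + ((j + 1 : Nat) : Int) by push_cast; ring]
            rw [PySem.Chars.slice_eq_listSlice, PySem.List.slice_natCast_add]
            conv_lhs => rw [hsplit]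
            rw [List.take_append]
            simp [hul]
          have hrec : (k : Int) + (j : Int) + 1 = ((k + j + 1 : Nat) : Int) := by
            push_cast; ring
          rw [hslice, hrec]
          have hkj : k + j + 1 ≤ c.length := by omega
          rw [IH (c.length - (k + j + 1)) (by omega) (k + j + 1) rfl hkj (i + 1)]
          have hdrop : c.drop (k + j + 1) = v := by
            have h1 : c.drop (k + j + 1) = (c.drop k).drop (j + 1) := by
              rw [List.drop_drop]; congr 1
            rw [h1]
            conv_lhs => rw [hsplit]
            rw [List.drop_append]
            simp [hul]
          rw [hdrop]
          conv_rhs => rw [hsplit, linesOf_append_newline _ v hnotu]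
          simp only [gSpec, if_pos hi]
          by_cases hs : start ≤ i
          · simp [hs, List.append_assoc]
          · simp [hs]
      · simp only [dif_neg hi]
        rw [gSpec_of_gt start num _ _ (by omega)]
        simp
  intro k hk i acc
  exact H (c.length - k) k rfl hk i acc

-- ===== VERDICT (by name: the statement is the Claim_ definition above) =====
theorem dump_lines_spec : Claim_equal_dump_lines := by
  intro contents start num _
  unfold Spec_dump_lines dump_lines dump_lines_alt
  rw [show (0 : Int) = ((0 : Nat) : Int) by simp]
  rw [mainA start num contents.toList 0 (by omega) 1 []]
  rw [mainB start num contents.toList [] [] 1 (by simp)]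
  simp
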